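-- pv_equiv track=rewrite | github.com/stammareddi/AI-Minesweeper | main.py | neighbors_count
-- ===== SOURCE A (Python) =====
-- clockwise_moves = [(-1, 0), (-1, 1), (0, 1), (1, 1), (1, 0), (1, -1), (0, -1), (-1, -1)]
--
-- dim = 30
--
-- def neighbors_count(position):
--     x = position[0]
--     y = position[1]
--     neighbors = 0
--     for x1, y1 in clockwise_moves:
--         inbounds = True if 0 <= x + x1 < dim and 0 <= y + y1 < dim else False
--         if inbounds:
--             neighbors += 1
--     return neighbors
-- ===== SOURCE B (Python) =====
-- dim = 30
--
-- def neighbors_count(position):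
--     x = position[0]
--     y = position[1]
--     cx = sum(1 for dx in (-1, 0, 1) if 0 <= x + dx < dim)
--     cy = sum(1 for dy in (-1, 0, 1) if 0 <= y + dy < dim)
--     center = 1 if 0 <= x < dim and 0 <= y < dim else 0
--     return cx * cy - center
-- ===== Notes on version B (the rewrite author's own statement) =====
-- stated objective: simpler
-- what changed: Replaces the 8-offset neighbor scan with a closed-form product: count valid row offsets times valid column offsets, minus 1 if the center cell is in bounds.
import Mathlib
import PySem

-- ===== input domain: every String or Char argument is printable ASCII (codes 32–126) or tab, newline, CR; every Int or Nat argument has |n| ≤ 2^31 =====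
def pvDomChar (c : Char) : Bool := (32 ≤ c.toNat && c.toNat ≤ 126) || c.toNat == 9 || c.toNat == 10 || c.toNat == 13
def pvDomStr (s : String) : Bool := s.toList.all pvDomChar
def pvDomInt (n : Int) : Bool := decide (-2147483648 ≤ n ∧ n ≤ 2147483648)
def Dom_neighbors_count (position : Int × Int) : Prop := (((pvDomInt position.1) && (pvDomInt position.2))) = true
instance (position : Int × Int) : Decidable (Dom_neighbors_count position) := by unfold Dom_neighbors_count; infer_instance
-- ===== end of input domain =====

-- B replaces the 8-offset scan with a closed-form row*column count; objective: simpler.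
-- ===== PORT A =====
def clockwise_moves : List (Int × Int) :=
  [(-1, 0), (-1, 1), (0, 1), (1, 1), (1, 0), (1, -1), (0, -1), (-1, -1)]

def pvDim : Int := 30

def neighbors_count (position : Int × Int) : Int :=
  let x := position.1
  let y := position.2
  clockwise_moves.foldl (fun neighbors m =>
    let inbounds := if 0 ≤ x + m.1 ∧ x + m.1 < pvDim ∧ 0 ≤ y + m.2 ∧ y + m.2 < pvDim then true else false
    if inbounds then neighbors + 1 else neighbors) 0

-- ===== PORT B =====
def pvCount1 (z : Int) : Int :=
  [(-1 : Int), 0, 1].foldl (fun c d => if 0 ≤ z + d ∧ z + d < pvDim then c + 1 else c) 0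

def neighbors_count_alt (position : Int × Int) : Int :=
  let x := position.1
  let y := position.2
  let cx := pvCount1 x
  let cy := pvCount1 y
  let center : Int := if 0 ≤ x ∧ x < pvDim ∧ 0 ≤ y ∧ y < pvDim then 1 else 0
  cx * cy - center

-- ===== PRECONDITION & SPEC =====
def Spec_neighbors_count (position : Int × Int) (out : Int) : Prop := out = neighbors_count_alt position
instance (position : Int × Int) (out : Int) : Decidable (Spec_neighbors_count position out) := by unfold Spec_neighbors_count; infer_instance

-- ===== CLAIM (what is proved, stated in full; the proofs are below) =====
def Claim_equal_neighbors_count : Prop := ∀ (position : Int × Int), Dom_neighbors_count position → Spec_neighbors_count position (neighbors_count position)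

-- ===== LEMMAS AND PROOFS =====
theorem pv_if_bool (c : Prop) [Decidable c] (a b : Int) :
    (if (if c then true else false) = true then a else b) = if c then a else b := by
  split_ifs <;> simp_all

theorem pv_ite_add (c : Prop) [Decidable c] (a : Int) :
    (if c then a + 1 else a) = a + (if c then (1 : Int) else 0) := by
  split_ifs <;> simp

theorem pv_ite_and_mul (p q : Prop) [Decidable p] [Decidable q] :
    (if p ∧ q then (1 : Int) else 0) = (if p then (1 : Int) else 0) * (if q then (1 : Int) else 0) := by
  split_ifs <;> simp_all

-- ===== VERDICT (by name: the statement is the Claim_ definition above) =====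
theorem neighbors_count_spec : Claim_equal_neighbors_count := by
  intro ⟨x, y⟩ _
  show neighbors_count (x, y) = neighbors_count_alt (x, y)
  simp only [neighbors_count, neighbors_count_alt, pvCount1, clockwise_moves, List.foldl,
    pv_if_bool, pv_ite_add, pv_ite_and_mul, add_zero]
  ring
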